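-- pv_equiv track=rewrite | github.com/microsoft/DeepSpeed | deepspeed/utils/groups.py | _get_expert_parallel_ranks
-- ===== SOURCE A (Python) =====
-- def _ensure_divisibility(numerator, denominator):
--     """Ensure that numerator is divisible by the denominator."""
--     assert numerator % denominator == 0, '{} is not divisible by {}'.format(numerator, denominator)
--
-- def _get_expert_parallel_ranks(world_size,
--                                tensor_parallel_size_,
--                                expert_parallel_size_,
--                                pipeline_parallel_size_=1,
--                                use_data_before_expert_parallel_=False):
--     """Generate expert parallel and expert data parallel group ranks list.
--
--         Example - E + M + D parallel
--         world_size = 16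
--         model_degree = 2
--         expert_degree = 4 # number of experts in same group
--         mp_group = [0, 1], [2,3], [4,5] ...
--         data_parallel_group =[0,2,4,6,8,10, 12,14],                 [1,3,5,7,9,11,13,15]
--         expert_parallel_group = [0,2,4,6], [8,10,12,14]             [1,3,5,7], [9,11,13,15]
--         expert_data_parallel_group = [0,8],[2,10],[4,12],[6,14],    [1,9],[3,11],[5,13],[7,15]
--
--     Args:
--         world_size (int): Distributed world size.
--         tensor_parallel_size_ (int): Tensor parallel group size.
--         expert_parallel_size_ (int): Expert parallel group size.
--         pipeline_parallel_size_ (int): Pipeline parallel group size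
--         use_data_before_expert_parallel_ (bool): Use the D + E instead of E + D topology
--     Returns:
--         Expert parallel group ranks and Expert data parallel group ranks list.
--     """
--     _ensure_divisibility(world_size, tensor_parallel_size_ * pipeline_parallel_size_)
--     dp_world_size = world_size // (tensor_parallel_size_ * pipeline_parallel_size_)
--     _ensure_divisibility(dp_world_size, expert_parallel_size_)
--
--     # Generate data parallel groups
--     data_parallel_groups = []
--     dp_group_size = tensor_parallel_size_
--     pp_stride = world_size // pipeline_parallel_size_
--
--     if use_data_before_expert_parallel_:
--         dp_stride = world_size // expert_parallel_size_ // tensor_parallel_size_ // pipeline_parallel_size_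
--         for pp_stage_start in range(0, world_size, pp_stride):
--             pp_stage_next = pp_stage_start + pp_stride
--             for i in range(dp_group_size):
--                 data_parallel_groups.append(list())
--                 for ds in range(dp_stride):
--                     # [0, 4, 8, 12, 16, 20, 24, 28, 2, 6, 10, 14, 18, 22, 26, 30]
--                     # [1, 5, 9, 13, 17, 21, 25, 29, 3, 7, 11, 15, 19, 23, 27, 31]
--                     data_parallel_groups[-1].extend(
--                         list(
--                             range(pp_stage_start + i + ds * tensor_parallel_size_, pp_stage_next,
--                                   dp_stride * tensor_parallel_size_)))
--     else:
--         for pp_stage_start in range(0, world_size, pp_stride):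
--             pp_stage_next = pp_stage_start + pp_stride
--             for i in range(dp_group_size):
--                 data_parallel_groups.append(list(range(pp_stage_start + i, pp_stage_next, dp_group_size)))
--
--     expert_parallel_groups = []
--     expert_data_parallel_groups = []
--     for dp_ranks in data_parallel_groups:
--         # partition of expert parallel groups, e.g. [0,2,4,6], [8,10,12,14]
--         part_ep_groups = []
--         for i in range(0, dp_world_size, expert_parallel_size_):
--             part_ep_groups.append(dp_ranks[i:i + expert_parallel_size_])
--         expert_parallel_groups.extend(part_ep_groups)
--
--         # zip part_ep_groups get expert data parallel ranks, e.g [0,8],[2,10],[4,12],[6,14]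
--         for expert_dp_ranks in zip(*part_ep_groups):
--             expert_data_parallel_groups.append(list(expert_dp_ranks))
--
--     return expert_parallel_groups, expert_data_parallel_groups
-- ===== SOURCE B (Python) =====
-- def _get_expert_parallel_ranks(world_size,
--                                tensor_parallel_size_,
--                                expert_parallel_size_,
--                                pipeline_parallel_size_=1,
--                                use_data_before_expert_parallel_=False):
--     """Grid/stride formulation: every rank is base + k*t for a (pipeline, tensor)
--     block base; expert and expert-data groups are emitted directly by closed-form
--     index arithmetic, with no intermediate data-parallel group lists, no slicing
--     and no zip transpose."""
--     t = tensor_parallel_size_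
--     p = pipeline_parallel_size_
--     e = expert_parallel_size_
--     assert world_size % (t * p) == 0
--     dp = world_size // (t * p)
--     assert dp % e == 0
--     n = dp // e              # expert groups per data-parallel group
--     pp_stride = world_size // p
--     ep, edp = [], []
--     for s in range(p):
--         for i in range(t):
--             base = s * pp_stride + i
--             if use_data_before_expert_parallel_:
--                 ep += [[base + (j + r * n) * t for r in range(e)] for j in range(n)]
--                 edp += [[base + (j + c * n) * t for j in range(n)] for c in range(e)]
--             else:
--                 ep += [[base + (j * e + r) * t for r in range(e)] for j in range(n)]
--                 edp += [[base + (j * e + c) * t for j in range(n)] for c in range(e)]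
--     return ep, edp
-- ===== Notes on version B (the rewrite author's own statement) =====
-- stated objective: alternative
-- what changed: B views the ranks as a (pipeline, tensor) grid of blocks and emits every expert-parallel and expert-data-parallel group directly by closed-form stride arithmetic over block indices, eliminating A's intermediate data_parallel_groups lists, the slicing into expert chunks and the zip(*...) transpose; Pre_ covers every input on which A returns except the corner world_size < 0 with positive tensor and pipeline sizes, where A's degenerate values (empty groups / lists of empty lists) are accidents of backwards ranges.
-- outside the precondition, e.g. on _get_expert_parallel_ranks(-10, 1, 1, 1, False): A returns ([], []), B returns ([], [[]]); on _get_expert_parallel_ranks(-8, 1, -4, 1, False): A returns ([[], []], []), B returns ([[], []], [])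
import Mathlib
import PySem

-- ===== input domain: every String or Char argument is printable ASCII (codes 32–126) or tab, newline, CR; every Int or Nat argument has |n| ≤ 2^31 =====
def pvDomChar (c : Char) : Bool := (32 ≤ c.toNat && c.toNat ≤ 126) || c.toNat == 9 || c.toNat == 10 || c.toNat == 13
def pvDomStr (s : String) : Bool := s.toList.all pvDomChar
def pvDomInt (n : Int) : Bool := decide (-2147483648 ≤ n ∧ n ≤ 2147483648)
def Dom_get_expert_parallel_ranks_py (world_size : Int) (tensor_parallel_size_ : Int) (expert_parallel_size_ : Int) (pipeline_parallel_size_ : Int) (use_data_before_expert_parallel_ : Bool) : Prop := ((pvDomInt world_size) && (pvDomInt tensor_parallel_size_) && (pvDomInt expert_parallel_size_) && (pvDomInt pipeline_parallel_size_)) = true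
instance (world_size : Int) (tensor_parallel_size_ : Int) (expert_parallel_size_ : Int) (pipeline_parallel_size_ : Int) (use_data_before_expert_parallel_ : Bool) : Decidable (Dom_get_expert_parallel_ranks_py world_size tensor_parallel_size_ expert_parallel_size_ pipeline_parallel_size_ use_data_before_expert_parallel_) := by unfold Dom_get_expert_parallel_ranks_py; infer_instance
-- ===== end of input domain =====

-- B replaces A's data_parallel_groups/slice/zip pipeline by direct stride arithmetic over a
-- (pipeline, tensor) block grid; equal on the natural domain (all sizes ≥ 1, t*e*p ∣ world_size).

-- ===== PORT A =====
-- zip(*lss) for a list of lists: take the heads while every list is nonempty (zip stops at the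
-- shortest list; the fuel, the length of the first list, bounds that minimum). Exact for zip(*lss).
def pyZipStarAux (fuel : Nat) (lss : List (List Int)) : List (List Int) :=
  match fuel with
  | 0 => []
  | fuel + 1 =>
    if lss.all (fun l => !l.isEmpty) then
      lss.map (fun l => l.headD 0) :: pyZipStarAux fuel (lss.map (fun l => l.tail))
    else []

def pyZipStar (lss : List (List Int)) : List (List Int) :=
  match lss with
  | [] => []
  | l :: rest => pyZipStarAux l.length (l :: rest)

def get_expert_parallel_ranks_py (world_size : Int) (tensor_parallel_size_ : Int) (expert_parallel_size_ : Int) (pipeline_parallel_size_ : Int) (use_data_before_expert_parallel_ : Bool) : List (List Int) × List (List Int) :=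
  -- the two _ensure_divisibility asserts hold on every input admitted by Pre_ (excluded otherwise)
  let dp_world_size := PySem.Int.floordiv world_size (tensor_parallel_size_ * pipeline_parallel_size_)
  let dp_group_size := tensor_parallel_size_
  let pp_stride := PySem.Int.floordiv world_size pipeline_parallel_size_
  let data_parallel_groups : List (List Int) :=
    if use_data_before_expert_parallel_ then
      let dp_stride := PySem.Int.floordiv (PySem.Int.floordiv (PySem.Int.floordiv world_size expert_parallel_size_) tensor_parallel_size_) pipeline_parallel_size_
      (PySem.List.pyRange 0 world_size pp_stride).foldl (fun acc pp_stage_start =>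
        let pp_stage_next := pp_stage_start + pp_stride
        (PySem.List.pyRange 0 dp_group_size 1).foldl (fun acc2 i =>
          acc2 ++ [(PySem.List.pyRange 0 dp_stride 1).foldl (fun g ds =>
            g ++ PySem.List.pyRange (pp_stage_start + i + ds * tensor_parallel_size_) pp_stage_next (dp_stride * tensor_parallel_size_)) []]) acc) []
    else
      (PySem.List.pyRange 0 world_size pp_stride).foldl (fun acc pp_stage_start =>
        let pp_stage_next := pp_stage_start + pp_stride
        (PySem.List.pyRange 0 dp_group_size 1).foldl (fun acc2 i =>
          acc2 ++ [PySem.List.pyRange (pp_stage_start + i) pp_stage_next dp_group_size]) acc) []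
  data_parallel_groups.foldl (fun acc dp_ranks =>
    let part_ep_groups := (PySem.List.pyRange 0 dp_world_size expert_parallel_size_).foldl
      (fun ps i => ps ++ [PySem.List.slice dp_ranks (some i) (some (i + expert_parallel_size_))]) []
    (acc.1 ++ part_ep_groups,
     (pyZipStar part_ep_groups).foldl (fun a2 g => a2 ++ [g]) acc.2)) ([], [])

-- ===== PORT B =====
def get_expert_parallel_ranks_py_alt (world_size : Int) (tensor_parallel_size_ : Int) (expert_parallel_size_ : Int) (pipeline_parallel_size_ : Int) (use_data_before_expert_parallel_ : Bool) : List (List Int) × List (List Int) :=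
  -- Source B's asserts hold on every input admitted by Pre_ (excluded otherwise)
  let t := tensor_parallel_size_
  let p := pipeline_parallel_size_
  let e := expert_parallel_size_
  let dp := PySem.Int.floordiv world_size (t * p)
  let n := PySem.Int.floordiv dp e
  let pp_stride := PySem.Int.floordiv world_size p
  (PySem.List.pyRange 0 p 1).foldl (fun acc s =>
    (PySem.List.pyRange 0 t 1).foldl (fun acc2 i =>
      let base := s * pp_stride + i
      if use_data_before_expert_parallel_ then
        (acc2.1 ++ (PySem.List.pyRange 0 n 1).map (fun j => (PySem.List.pyRange 0 e 1).map (fun r => base + (j + r * n) * t)),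
         acc2.2 ++ (PySem.List.pyRange 0 e 1).map (fun c => (PySem.List.pyRange 0 n 1).map (fun j => base + (j + c * n) * t)))
      else
        (acc2.1 ++ (PySem.List.pyRange 0 n 1).map (fun j => (PySem.List.pyRange 0 e 1).map (fun r => base + (j * e + r) * t)),
         acc2.2 ++ (PySem.List.pyRange 0 e 1).map (fun c => (PySem.List.pyRange 0 n 1).map (fun j => base + (j * e + c) * t)))) acc) ([], [])

-- ===== PRECONDITION & SPEC =====
-- Pre_ covers the inputs on which A returns, except part of the degenerate region
-- world_size < 0 with positive tensor/pipeline sizes, where A's values (empty groups or lists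
-- of empty lists built by backwards ranges) are accidents of the implementation that a natural
-- reimplementation does not reproduce.  The divisibility conjuncts are A's two asserts; the
-- nonzero quotient conjunct excludes range(0, world_size, 0), which raises ValueError.
def Pre_get_expert_parallel_ranks_py (world_size : Int) (tensor_parallel_size_ : Int) (expert_parallel_size_ : Int) (pipeline_parallel_size_ : Int) (use_data_before_expert_parallel_ : Bool) : Prop :=
  tensor_parallel_size_ ≠ 0 ∧ expert_parallel_size_ ≠ 0 ∧ pipeline_parallel_size_ ≠ 0 ∧
  (tensor_parallel_size_ * pipeline_parallel_size_) ∣ world_size ∧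
  expert_parallel_size_ ∣ PySem.Int.floordiv world_size (tensor_parallel_size_ * pipeline_parallel_size_) ∧
  PySem.Int.floordiv world_size pipeline_parallel_size_ ≠ 0 ∧
  (1 ≤ world_size ∨ tensor_parallel_size_ < 0 ∨ pipeline_parallel_size_ < 0)
instance (world_size : Int) (tensor_parallel_size_ : Int) (expert_parallel_size_ : Int) (pipeline_parallel_size_ : Int) (use_data_before_expert_parallel_ : Bool) : Decidable (Pre_get_expert_parallel_ranks_py world_size tensor_parallel_size_ expert_parallel_size_ pipeline_parallel_size_ use_data_before_expert_parallel_) := by unfold Pre_get_expert_parallel_ranks_py; infer_instance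

def pvWitness_get_expert_parallel_ranks_py : Int × Int × Int × Int × Bool := (16, 2, 4, 1, false)

def Spec_get_expert_parallel_ranks_py (world_size : Int) (tensor_parallel_size_ : Int) (expert_parallel_size_ : Int) (pipeline_parallel_size_ : Int) (use_data_before_expert_parallel_ : Bool) (out : List (List Int) × List (List Int)) : Prop := out = get_expert_parallel_ranks_py_alt world_size tensor_parallel_size_ expert_parallel_size_ pipeline_parallel_size_ use_data_before_expert_parallel_
instance (world_size : Int) (tensor_parallel_size_ : Int) (expert_parallel_size_ : Int) (pipeline_parallel_size_ : Int) (use_data_before_expert_parallel_ : Bool) (out : List (List Int) × List (List Int)) : Decidable (Spec_get_expert_parallel_ranks_py world_size tensor_parallel_size_ expert_parallel_size_ pipeline_parallel_size_ use_data_before_expert_parallel_ out) := by unfold Spec_get_expert_parallel_ranks_py; infer_instance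

-- ===== CLAIM (what is proved, stated in full; the proofs are below) =====
def Claim_equal_get_expert_parallel_ranks_py : Prop := ∀ (world_size : Int) (tensor_parallel_size_ : Int) (expert_parallel_size_ : Int) (pipeline_parallel_size_ : Int) (use_data_before_expert_parallel_ : Bool), Dom_get_expert_parallel_ranks_py world_size tensor_parallel_size_ expert_parallel_size_ pipeline_parallel_size_ use_data_before_expert_parallel_ → Pre_get_expert_parallel_ranks_py world_size tensor_parallel_size_ expert_parallel_size_ pipeline_parallel_size_ use_data_before_expert_parallel_ → Spec_get_expert_parallel_ranks_py world_size tensor_parallel_size_ expert_parallel_size_ pipeline_parallel_size_ use_data_before_expert_parallel_ (get_expert_parallel_ranks_py world_size tensor_parallel_size_ expert_parallel_size_ pipeline_parallel_size_ use_data_before_expert_parallel_)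

-- ===== LEMMAS AND PROOFS =====

-- a group family in block form: one list per data-parallel group index j, E ranks each
def pvEP (v : Nat → Nat → Int) (E N : Nat) : List (List Int) :=
  (List.range N).map (fun j => (List.range E).map (fun r => v j r))
def pvEDP (v : Nat → Nat → Int) (E N : Nat) : List (List Int) :=
  (List.range E).map (fun c => (List.range N).map (fun j => v j c))
def pvBlk (v : Nat → Nat → Int) (E N : Nat) : List Int :=
  (List.range N).flatMap (fun j => (List.range E).map (fun r => v j r))
def pvL (P T : Nat) : List (Nat × Nat) :=
  (List.range P).flatMap (fun S => (List.range T).map (fun I => (S, I)))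

theorem pvZipAux_maps {γ : Type} (E : Nat) : ∀ (J : List γ) (v : γ → Nat → Int),
    pyZipStarAux E (J.map (fun j => (List.range E).map (v j)))
      = (List.range E).map (fun c => J.map (fun j => v j c)) := by
  induction E with
  | zero => intro J v; simp [pyZipStarAux]
  | succ E ih =>
    intro J v
    rw [List.range_succ_eq_map]
    simp only [pyZipStarAux, List.map_map]
    have hall : (J.map (fun j => List.map (v j) (0 :: List.map Nat.succ (List.range E)))).all (fun l => !l.isEmpty) = true := by
      simp [List.all_map]
    rw [if_pos hall]
    simp only [List.map_map, Function.comp_def, List.map_cons, List.headD_cons, List.tail_cons]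
    have := ih J (fun j r => v j (r + 1))
    rw [this]

theorem pvZipStar_maps {γ : Type} (E : Nat) (j0 : γ) (J' : List γ) (v : γ → Nat → Int) :
    pyZipStar ((j0 :: J').map (fun j => (List.range E).map (v j)))
      = (List.range E).map (fun c => (j0 :: J').map (fun j => v j c)) := by
  have h := pvZipAux_maps E (j0 :: J') v
  simp only [List.map_cons] at h ⊢
  rw [pyZipStar]
  simpa using h

theorem pv_take_drop_flatMap {α : Type} (E : Nat) :
    ∀ (N : Nat) (g : Nat → List α) (j : Nat), (∀ i, i < N → (g i).length = E) → j < N →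
    ((((List.range N).flatMap g)).drop (E * j)).take E = g j := by
  intro N
  induction N with
  | zero => intro g j _ hj; omega
  | succ N ih =>
    intro g j hlen hj
    rw [List.range_succ_eq_map, List.flatMap_cons, List.flatMap_map]
    cases j with
    | zero =>
      simp only [Nat.mul_zero, List.drop_zero]
      rw [show E = (g 0).length from (hlen 0 (by omega)).symm, List.take_left]
    | succ j =>
      have h0 : (g 0).length = E := hlen 0 (by omega)
      have hE : E * (j + 1) = E + E * j := by ring
      rw [hE, List.drop_append, h0, List.drop_eq_nil_of_le (by omega), List.nil_append,
          Nat.add_sub_cancel_left]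
      exact ih (fun i => g (i + 1)) j (fun i hi => hlen (i + 1) (by omega)) (by omega)

theorem pv_map_range_mul {α : Type} (f : Nat → α) (E : Nat) :
    ∀ N, (List.range (N * E)).map f
      = (List.range N).flatMap (fun j => (List.range E).map (fun r => f (j * E + r))) := by
  intro N
  induction N with
  | zero => simp
  | succ N ih =>
    rw [Nat.succ_mul, List.range_add, List.map_append, List.map_map, ih, List.range_succ,
        List.flatMap_append]
    simp [Function.comp_def]

theorem pv_pyRange_arith (a b : Int) (K M : Nat) (hK : 0 < (K : Int))
    (h1 : a + (K : Int) * ((M : Int) - 1) < b) (h2 : b ≤ a + (K : Int) * (M : Int)) :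
    PySem.List.pyRange a b (K : Int) = (List.range M).map (fun (k : Nat) => a + (K : Int) * (k : Int)) := by
  rw [PySem.List.pyRange_of_pos a b hK]
  rcases Nat.eq_zero_or_pos M with hM | hM
  · subst hM
    rw [if_neg (by push_cast at h2 ⊢; omega)]
  · have hM1 : (1 : Int) ≤ (M : Int) := by exact_mod_cast hM
    have hab : a < b := by nlinarith
    rw [if_pos hab]
    have hq : (b - a + (K : Int) - 1) / (K : Int) = (M : Int) := by
      have hle : (M : Int) ≤ (b - a + (K : Int) - 1) / (K : Int) := by
        rw [Int.le_ediv_iff_mul_le hK]; nlinarith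
      have hlt : (b - a + (K : Int) - 1) / (K : Int) < (M : Int) + 1 := by
        rw [Int.ediv_lt_iff_lt_mul hK]; nlinarith
      omega
    rw [hq, Int.toNat_natCast]

theorem pv_part_eq (E N : Nat) (hE : 0 < E) (v : Nat → Nat → Int) :
    (PySem.List.pyRange 0 ((E * N : Nat) : Int) ((E : Nat) : Int)).foldl
      (fun ps i => ps ++ [PySem.List.slice (pvBlk v E N) (some i) (some (i + ((E : Nat) : Int)))]) []
    = pvEP v E N := by
  rw [pv_pyRange_arith 0 _ E N (by exact_mod_cast hE) (by push_cast; nlinarith) (by push_cast; nlinarith),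
      List.foldl_map, PySem.List.foldl_append_singleton_eq_map, List.nil_append]
  unfold pvEP
  apply List.map_congr_left
  intro k hk
  rw [List.mem_range] at hk
  have h0 : (0 : Int) + (E : Int) * (k : Int) = ((E * k : Nat) : Int) := by push_cast; ring
  rw [h0, show ((E * k : Nat) : Int) + ((E : Nat) : Int) = ((E * k : Nat) : Int) + ((E : Nat) : Int) from rfl,
      PySem.List.slice_natCast_add]
  exact pv_take_drop_flatMap E N _ k (fun i _ => by simp) hk

theorem pv_zip_pvEP (E N : Nat) (hN : 0 < N) (v : Nat → Nat → Int) :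
    pyZipStar (pvEP v E N) = pvEDP v E N := by
  cases N with
  | zero => omega
  | succ M =>
    unfold pvEP pvEDP
    rw [List.range_succ_eq_map (n := M), List.map_cons]
    have h := pvZipStar_maps E 0 (List.map Nat.succ (List.range M)) v
    simp only [List.map_cons] at h
    rw [h]
    simp

theorem pv_pair_foldl {γ : Type} (l : List γ) (X Y : γ → List (List Int)) :
    ∀ acc : List (List Int) × List (List Int),
    l.foldl (fun acc s => (acc.1 ++ X s, acc.2 ++ Y s)) acc
      = (acc.1 ++ l.flatMap X, acc.2 ++ l.flatMap Y) := by
  induction l with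
  | nil => intro acc; simp
  | cons x l ih => intro acc; simp [ih, List.flatMap_cons]

theorem pv_pair_foldl2 {γ δ : Type} (l : List γ) (m : List δ) (X Y : γ → δ → List (List Int)) :
    ∀ acc : List (List Int) × List (List Int),
    l.foldl (fun acc s => m.foldl (fun a2 i => (a2.1 ++ X s i, a2.2 ++ Y s i)) acc) acc
      = (acc.1 ++ l.flatMap (fun s => m.flatMap (X s)), acc.2 ++ l.flatMap (fun s => m.flatMap (Y s))) := by
  induction l with
  | nil => intro acc; simp
  | cons x l ih => intro acc; simp [pv_pair_foldl, List.flatMap_cons, List.append_assoc]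

theorem pv_phase2 (E N : Nat) (hE : 0 < E) (hN : 0 < N) {γ : Type} (L : List γ) (vv : γ → Nat → Nat → Int) :
    ∀ acc : List (List Int) × List (List Int),
    (L.map (fun x => pvBlk (vv x) E N)).foldl
      (fun acc dp_ranks =>
        (acc.1 ++ (PySem.List.pyRange 0 ((E * N : Nat) : Int) ((E : Nat) : Int)).foldl
            (fun ps i => ps ++ [PySem.List.slice dp_ranks (some i) (some (i + ((E : Nat) : Int)))]) [],
         (pyZipStar ((PySem.List.pyRange 0 ((E * N : Nat) : Int) ((E : Nat) : Int)).foldl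
            (fun ps i => ps ++ [PySem.List.slice dp_ranks (some i) (some (i + ((E : Nat) : Int)))]) [])).foldl
            (fun a2 g => a2 ++ [g]) acc.2)) acc
    = (acc.1 ++ L.flatMap (fun x => pvEP (vv x) E N),
       acc.2 ++ L.flatMap (fun x => pvEDP (vv x) E N)) := by
  induction L with
  | nil => intro acc; simp
  | cons x L ih =>
    intro acc
    simp only [List.map_cons, List.foldl_cons]
    rw [pv_part_eq E N hE (vv x), pv_zip_pvEP E N hN (vv x),
        PySem.List.foldl_append_singleton_eq_self, ih]
    simp [List.flatMap_cons, List.append_assoc]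


theorem pv_dpg_false (T E P N : Nat) (hT : 0 < T) (hE : 0 < E) (_hP : 0 < P) (hN : 0 < N) :
    List.foldl (fun acc pp_stage_start =>
        List.foldl (fun acc2 i => acc2 ++ [PySem.List.pyRange (pp_stage_start + i) (pp_stage_start + ((T * E * N : Nat) : Int)) ((T : Nat) : Int)]) acc
          (PySem.List.pyRange 0 ((T : Nat) : Int) 1))
      [] (PySem.List.pyRange 0 ((T * E * P * N : Nat) : Int) ((T * E * N : Nat) : Int))
    = (pvL P T).map (fun si => pvBlk (fun j r => (si.1 : Int) * ((T * E * N : Nat) : Int) + (si.2 : Int) + ((T : Nat) : Int) * ((j * E + r : Nat) : Int)) E N) := by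
  have hTEN : (0:Int) < ((T * E * N : Nat) : Int) := by exact_mod_cast Nat.mul_pos (Nat.mul_pos hT hE) hN
  have hTEN' : (0:Int) < (T:Int) * (E:Int) * (N:Int) := by push_cast at hTEN; linarith
  rw [pv_pyRange_arith 0 _ (T * E * N) P hTEN
        (by push_cast; nlinarith [hTEN']) (by push_cast; nlinarith [hTEN']),
      List.foldl_map]
  simp only [PySem.List.pyRange_one, sub_zero, Int.toNat_natCast, List.foldl_map,
      PySem.List.foldl_append_singleton_eq_map, PySem.List.foldl_append_eq_flatMap,
      List.nil_append]
  unfold pvL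
  rw [List.map_flatMap]
  apply List.flatMap_congr
  intro S hS
  rw [List.map_map]
  apply List.map_congr_left
  intro I hI
  rw [List.mem_range] at hS hI
  have hIT : (I : Int) < (T : Int) := by exact_mod_cast hI
  rw [pv_pyRange_arith _ _ T (E * N) (by exact_mod_cast hT)
        (by push_cast; nlinarith) (by push_cast; nlinarith),
      Nat.mul_comm E N, pv_map_range_mul]
  unfold pvBlk
  apply List.flatMap_congr
  intro j hj
  apply List.map_congr_left
  intro r hr
  push_cast
  ring


theorem pv_dpg_true (T E P N : Nat) (hT : 0 < T) (hE : 0 < E) (_hP : 0 < P) (hN : 0 < N) :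
    List.foldl (fun acc pp_stage_start =>
        List.foldl (fun acc2 i =>
            acc2 ++ [List.foldl (fun g ds =>
                g ++ PySem.List.pyRange (pp_stage_start + i + ds * ((T : Nat) : Int)) (pp_stage_start + ((T * E * N : Nat) : Int)) (((N : Nat) : Int) * ((T : Nat) : Int))) []
              (PySem.List.pyRange 0 ((N : Nat) : Int) 1)]) acc
          (PySem.List.pyRange 0 ((T : Nat) : Int) 1))
      [] (PySem.List.pyRange 0 ((T * E * P * N : Nat) : Int) ((T * E * N : Nat) : Int))
    = (pvL P T).map (fun si => pvBlk (fun j r => (si.1 : Int) * ((T * E * N : Nat) : Int) + (si.2 : Int) + (j : Int) * ((T : Nat) : Int) + ((N * T : Nat) : Int) * (r : Int)) E N) := by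
  have hTEN : (0:Int) < ((T * E * N : Nat) : Int) := by exact_mod_cast Nat.mul_pos (Nat.mul_pos hT hE) hN
  have hTEN' : (0:Int) < (T:Int) * (E:Int) * (N:Int) := by push_cast at hTEN; linarith
  have hNT : (0:Int) < (N:Int) * (T:Int) := by exact_mod_cast Nat.mul_pos hN hT
  rw [pv_pyRange_arith 0 _ (T * E * N) P hTEN
        (by push_cast; nlinarith [hTEN']) (by push_cast; nlinarith [hTEN']),
      List.foldl_map]
  simp only [PySem.List.pyRange_one, sub_zero, Int.toNat_natCast, List.foldl_map,
      PySem.List.foldl_append_singleton_eq_map, PySem.List.foldl_append_eq_flatMap,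
      List.nil_append]
  unfold pvL
  rw [List.map_flatMap]
  apply List.flatMap_congr
  intro S hS
  rw [List.map_map]
  apply List.map_congr_left
  intro I hI
  rw [List.mem_range] at hS hI
  have hIT : (I : Int) < (T : Int) := by exact_mod_cast hI
  unfold pvBlk
  apply List.flatMap_congr
  intro ds hds
  rw [List.mem_range] at hds
  have hdsN : (ds : Int) < (N : Int) := by exact_mod_cast hds
  rw [show ((N : Nat) : Int) * ((T : Nat) : Int) = ((N * T : Nat) : Int) from by push_cast; ring,
      pv_pyRange_arith _ _ (N * T) E (by exact_mod_cast Nat.mul_pos hN hT)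
        (by push_cast; nlinarith) (by push_cast; nlinarith)]
  apply List.map_congr_left
  intro r hr
  push_cast
  ring


theorem pv_pyRange_neg_nil (a b s : Int) (hs : s < 0) (hab : a ≤ b) :
    PySem.List.pyRange a b s = [] := by
  simp only [PySem.List.pyRange]
  rw [if_neg (by omega)]
  have h1 : ¬ (0 < s) := by omega
  have h2 : ¬ (b < a) := by omega
  simp [h1, h2]

theorem pv_floordiv_neg (w p : Int) (hw : 1 ≤ w) (hp : p < 0) :
    PySem.Int.floordiv w p < 0 := by
  by_contra hc
  rw [not_lt] at hc
  obtain ⟨hm1, hm2⟩ := PySem.Int.mod_neg_bounds w hp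
  have hfm := PySem.Int.floordiv_mul_add_mod w p
  nlinarith

theorem pv_floordiv_dvd_pos (w d : Int) (hw : 1 ≤ w) (hd : 0 < d) (hdvd : d ∣ w) :
    1 ≤ PySem.Int.floordiv w d := by
  obtain ⟨c, hc⟩ := hdvd
  have hc1 : 1 ≤ c := by nlinarith
  rw [PySem.Int.floordiv_eq_ediv_of_pos hd, hc, Int.mul_ediv_cancel_left _ (ne_of_gt hd)]
  exact hc1

theorem pv_pyRange_pos_nil (a b s : Int) (hs : 0 < s) (hab : b ≤ a) :
    PySem.List.pyRange a b s = [] := by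
  simp only [PySem.List.pyRange]
  rw [if_neg (by omega), if_pos hs, if_neg (by omega)]
  simp

theorem pv_floordiv_negneg_nonneg (w p : Int) (hw : w ≤ -1) (hp : p < 0) :
    0 ≤ PySem.Int.floordiv w p := by
  by_contra hc
  rw [not_le] at hc
  obtain ⟨hm1, hm2⟩ := PySem.Int.mod_neg_bounds w hp
  have hfm := PySem.Int.floordiv_mul_add_mod w p
  nlinarith

theorem pv_case_wneg_pneg (w t e p : Int) (b : Bool) (hw : w ≤ -1) (hp : p < 0)
    (hps : PySem.Int.floordiv w p ≠ 0) :
    get_expert_parallel_ranks_py w t e p b = get_expert_parallel_ranks_py_alt w t e p b := by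
  have h1 : PySem.List.pyRange 0 w (PySem.Int.floordiv w p) = [] :=
    pv_pyRange_pos_nil 0 w _ (lt_of_le_of_ne (pv_floordiv_negneg_nonneg w p hw hp) (Ne.symm hps))
      (by omega)
  have h2 : PySem.List.pyRange 0 p 1 = [] := PySem.List.pyRange_one_eq_nil (by omega)
  cases b <;>
    simp [get_expert_parallel_ranks_py, get_expert_parallel_ranks_py_alt, h1, h2]

theorem pv_case_pneg (w t e p : Int) (b : Bool) (hw : 1 ≤ w) (hp : p < 0) :
    get_expert_parallel_ranks_py w t e p b = get_expert_parallel_ranks_py_alt w t e p b := by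
  have h1 : PySem.List.pyRange 0 w (PySem.Int.floordiv w p) = [] :=
    pv_pyRange_neg_nil 0 w _ (pv_floordiv_neg w p hw hp) (by omega)
  have h2 : PySem.List.pyRange 0 p 1 = [] := PySem.List.pyRange_one_eq_nil (by omega)
  cases b <;>
    simp [get_expert_parallel_ranks_py, get_expert_parallel_ranks_py_alt, h1, h2]

theorem pv_case_tneg (w t e p : Int) (b : Bool) (ht : t < 0) :
    get_expert_parallel_ranks_py w t e p b = get_expert_parallel_ranks_py_alt w t e p b := by
  have h1 : PySem.List.pyRange 0 t 1 = [] := PySem.List.pyRange_one_eq_nil (by omega)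
  cases b <;>
    simp [get_expert_parallel_ranks_py, get_expert_parallel_ranks_py_alt, h1,
      PySem.List.foldl_ignore]

theorem pv_case_eneg (w t e p : Int) (b : Bool) (hw : 1 ≤ w) (ht : 0 < t) (hp : 0 < p)
    (he : e < 0) (hdvd : (t * p) ∣ w) :
    get_expert_parallel_ranks_py w t e p b = get_expert_parallel_ranks_py_alt w t e p b := by
  have htp : 0 < t * p := mul_pos ht hp
  have hdp1 : 1 ≤ PySem.Int.floordiv w (t * p) := pv_floordiv_dvd_pos w (t * p) hw htp hdvd
  have h1 : PySem.List.pyRange 0 (PySem.Int.floordiv w (t * p)) e = [] :=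
    pv_pyRange_neg_nil 0 _ e he (by omega)
  have h2 : PySem.List.pyRange 0 (PySem.Int.floordiv (PySem.Int.floordiv w (t * p)) e) 1 = [] :=
    PySem.List.pyRange_one_eq_nil
      (le_of_lt (pv_floordiv_neg (PySem.Int.floordiv w (t * p)) e (by omega) he))
  have h3 : PySem.List.pyRange 0 e 1 = [] := PySem.List.pyRange_one_eq_nil (by omega)
  cases b <;>
    simp [get_expert_parallel_ranks_py, get_expert_parallel_ranks_py_alt, h1, h2, h3,
      pyZipStar, PySem.List.foldl_ignore]

theorem pv_main (T E P N : Nat) (hT : 0 < T) (hE : 0 < E) (hP : 0 < P) (hN : 0 < N) (b : Bool) :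
    get_expert_parallel_ranks_py ((T * E * P * N : Nat) : Int) (T : Int) (E : Int) (P : Int) b
      = get_expert_parallel_ranks_py_alt ((T * E * P * N : Nat) : Int) (T : Int) (E : Int) (P : Int) b := by
  have hTP : (0:Int) < (T:Int) * (P:Int) := by exact_mod_cast Nat.mul_pos hT hP
  have hdp : PySem.Int.floordiv ((T * E * P * N : Nat) : Int) ((T:Int) * (P:Int)) = ((E * N : Nat) : Int) := by
    rw [PySem.Int.floordiv_eq_ediv_of_pos hTP,
        show ((T * E * P * N : Nat) : Int) = ((E * N : Nat) : Int) * ((T:Int) * (P:Int)) from by push_cast; ring]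
    exact Int.mul_ediv_cancel _ (ne_of_gt hTP)
  have hpp : PySem.Int.floordiv ((T * E * P * N : Nat) : Int) ((P : Nat) : Int) = ((T * E * N : Nat) : Int) := by
    rw [PySem.Int.floordiv_eq_ediv_of_pos (by exact_mod_cast hP),
        show ((T * E * P * N : Nat) : Int) = ((T * E * N : Nat) : Int) * ((P : Nat) : Int) from by push_cast; ring]
    exact Int.mul_ediv_cancel _ (by exact_mod_cast Nat.pos_iff_ne_zero.mp hP)
  have hdsA : PySem.Int.floordiv ((T * E * P * N : Nat) : Int) ((E : Nat) : Int) = ((T * P * N : Nat) : Int) := by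
    rw [PySem.Int.floordiv_eq_ediv_of_pos (by exact_mod_cast hE),
        show ((T * E * P * N : Nat) : Int) = ((T * P * N : Nat) : Int) * ((E : Nat) : Int) from by push_cast; ring]
    exact Int.mul_ediv_cancel _ (by exact_mod_cast Nat.pos_iff_ne_zero.mp hE)
  have hdsB : PySem.Int.floordiv ((T * P * N : Nat) : Int) ((T : Nat) : Int) = ((P * N : Nat) : Int) := by
    rw [PySem.Int.floordiv_eq_ediv_of_pos (by exact_mod_cast hT),
        show ((T * P * N : Nat) : Int) = ((P * N : Nat) : Int) * ((T : Nat) : Int) from by push_cast; ring]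
    exact Int.mul_ediv_cancel _ (by exact_mod_cast Nat.pos_iff_ne_zero.mp hT)
  have hdsC : PySem.Int.floordiv ((P * N : Nat) : Int) ((P : Nat) : Int) = ((N : Nat) : Int) := by
    rw [PySem.Int.floordiv_eq_ediv_of_pos (by exact_mod_cast hP),
        show ((P * N : Nat) : Int) = ((N : Nat) : Int) * ((P : Nat) : Int) from by push_cast; ring]
    exact Int.mul_ediv_cancel _ (by exact_mod_cast Nat.pos_iff_ne_zero.mp hP)
  have hds : PySem.Int.floordiv (PySem.Int.floordiv (PySem.Int.floordiv ((T * E * P * N : Nat) : Int) ((E : Nat) : Int)) ((T : Nat) : Int)) ((P : Nat) : Int) = ((N : Nat) : Int) := by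
    rw [hdsA, hdsB, hdsC]
  have hn : PySem.Int.floordiv ((E * N : Nat) : Int) ((E : Nat) : Int) = ((N : Nat) : Int) := by
    rw [PySem.Int.floordiv_eq_ediv_of_pos (by exact_mod_cast hE),
        show ((E * N : Nat) : Int) = ((N : Nat) : Int) * ((E : Nat) : Int) from by push_cast; ring]
    exact Int.mul_ediv_cancel _ (by exact_mod_cast Nat.pos_iff_ne_zero.mp hE)
  simp only [get_expert_parallel_ranks_py, get_expert_parallel_ranks_py_alt, hdp, hpp, hds, hn]
  cases b
  · -- E + D topology
    simp only [Bool.false_eq_true, if_false]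
    rw [pv_dpg_false T E P N hT hE hP hN, pv_phase2 E N hE hN (pvL P T) _ ([], [])]
    simp only [PySem.List.pyRange_one, sub_zero, Int.toNat_natCast, List.foldl_map, List.map_map]
    rw [pv_pair_foldl2]
    simp only [List.nil_append, Prod.mk.injEq]
    constructor
    · unfold pvL pvEP
      rw [List.flatMap_assoc]
      apply List.flatMap_congr
      intro S hS
      rw [List.flatMap_map]
      apply List.flatMap_congr
      intro I hI
      apply List.map_congr_left
      intro j hj
      apply List.map_congr_left
      intro r hr
      simp only [Function.comp_def]
      push_cast
      ring
    · unfold pvL pvEDP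
      rw [List.flatMap_assoc]
      apply List.flatMap_congr
      intro S hS
      rw [List.flatMap_map]
      apply List.flatMap_congr
      intro I hI
      apply List.map_congr_left
      intro c hc
      apply List.map_congr_left
      intro j hj
      simp only [Function.comp_def]
      push_cast
      ring
  · -- D + E topology
    simp only [if_true]
    rw [pv_dpg_true T E P N hT hE hP hN, pv_phase2 E N hE hN (pvL P T) _ ([], [])]
    simp only [PySem.List.pyRange_one, sub_zero, Int.toNat_natCast, List.foldl_map, List.map_map]
    rw [pv_pair_foldl2]
    simp only [List.nil_append, Prod.mk.injEq]
    constructor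
    · unfold pvL pvEP
      rw [List.flatMap_assoc]
      apply List.flatMap_congr
      intro S hS
      rw [List.flatMap_map]
      apply List.flatMap_congr
      intro I hI
      apply List.map_congr_left
      intro j hj
      apply List.map_congr_left
      intro r hr
      simp only [Function.comp_def]
      push_cast
      ring
    · unfold pvL pvEDP
      rw [List.flatMap_assoc]
      apply List.flatMap_congr
      intro S hS
      rw [List.flatMap_map]
      apply List.flatMap_congr
      intro I hI
      apply List.map_congr_left
      intro c hc
      apply List.map_congr_left
      intro j hj
      simp only [Function.comp_def]
      push_cast
      ring

-- ===== VERDICT (by name: the statement is the Claim_ definition above) =====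
theorem get_expert_parallel_ranks_py_spec : Claim_equal_get_expert_parallel_ranks_py := by
  intro w t e p b _hdom hpre
  obtain ⟨ht, he, hp, hdvd, hdvd2, hps, hsign⟩ := hpre
  unfold Spec_get_expert_parallel_ranks_py
  rcases lt_or_gt_of_ne ht with htneg | htpos
  · exact pv_case_tneg w t e p b htneg
  rcases le_or_gt w 0 with hwneg | hwpos
  · -- t > 0 and w ≤ 0: Pre_ forces p < 0 (and w ≠ 0, since w // p would be 0)
    have hpneg : p < 0 := by
      rcases hsign with h | h | h
      · omega
      · omega
      · exact h
    have hw1 : w ≤ -1 := by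
      rcases lt_or_eq_of_le hwneg with h | h
      · omega
      · exfalso; apply hps; rw [h]
        simp [PySem.Int.floordiv, Int.zero_fdiv]
    exact pv_case_wneg_pneg w t e p b hw1 hpneg hps
  have hw : 1 ≤ w := hwpos
  rcases lt_or_gt_of_ne hp with hpneg | hppos
  · exact pv_case_pneg w t e p b hw hpneg
  rcases lt_or_gt_of_ne he with heneg | hepos
  · exact pv_case_eneg w t e p b hw htpos hppos heneg hdvd
  -- the natural case: all sizes positive and t*e*p ∣ w
  have htp : 0 < t * p := mul_pos htpos hppos
  obtain ⟨c, hc⟩ := hdvd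
  have hcval : PySem.Int.floordiv w (t * p) = c := by
    rw [PySem.Int.floordiv_eq_ediv_of_pos htp, hc, Int.mul_ediv_cancel_left _ (ne_of_gt htp)]
  have hc1 : 1 ≤ c := by nlinarith
  rw [hcval] at hdvd2
  obtain ⟨n, hn⟩ := hdvd2
  have hn1 : 1 ≤ n := by nlinarith
  have h := pv_main t.toNat e.toNat p.toNat n.toNat (by omega) (by omega) (by omega) (by omega) b
  push_cast at h
  rw [Int.toNat_of_nonneg (by omega : (0:Int) ≤ t), Int.toNat_of_nonneg (by omega : (0:Int) ≤ e),
      Int.toNat_of_nonneg (by omega : (0:Int) ≤ p), Int.toNat_of_nonneg (by omega : (0:Int) ≤ n)] at h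
  rw [show t * e * p * n = w from by rw [hc, hn]; ring] at h
  exact h
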